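-- pv_equiv track=rewrite | github.com/EduBarb0sa/Ler_CSV | Ler.py | contar_elemento5
-- ===== SOURCE A (Python) =====
-- def contar_elemento5(lista, elemento5, elemento8, elemento10, elemento155, elemento20, elemento25, elemento30, elemento36):
--     contador = 0
--     for linha in lista:
--         for item in linha:
--             if item == elemento5:
--                 contador += 1
--             if item == elemento8:
--                 contador += 1
--             if item == elemento10:
--                 contador += 2
--             if item == elemento155:
--                 contador += 3
--             if item == elemento20:
--                 contador += 4
--             if item == elemento25:
--                 contador += 5
--             if item == elemento30:
--                 contador += 6
--             if item == elemento36: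
--                 contador += 7
--     return contador
-- ===== SOURCE B (Python) =====
-- def contar_elemento5(lista, elemento5, elemento8, elemento10, elemento155, elemento20, elemento25, elemento30, elemento36):
--     flat = [item for linha in lista for item in linha]
--     return (flat.count(elemento5) * 1
--             + flat.count(elemento8) * 1
--             + flat.count(elemento10) * 2
--             + flat.count(elemento155) * 3
--             + flat.count(elemento20) * 4
--             + flat.count(elemento25) * 5
--             + flat.count(elemento30) * 6
--             + flat.count(elemento36) * 7)
-- ===== Notes on version B (the rewrite author's own statement) =====
-- stated objective: simpler
-- what changed: Replaces the nested loop with eight interleaved per-item comparisons by flattening once and summing weighted .count() tallies of each target.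
import Mathlib
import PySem

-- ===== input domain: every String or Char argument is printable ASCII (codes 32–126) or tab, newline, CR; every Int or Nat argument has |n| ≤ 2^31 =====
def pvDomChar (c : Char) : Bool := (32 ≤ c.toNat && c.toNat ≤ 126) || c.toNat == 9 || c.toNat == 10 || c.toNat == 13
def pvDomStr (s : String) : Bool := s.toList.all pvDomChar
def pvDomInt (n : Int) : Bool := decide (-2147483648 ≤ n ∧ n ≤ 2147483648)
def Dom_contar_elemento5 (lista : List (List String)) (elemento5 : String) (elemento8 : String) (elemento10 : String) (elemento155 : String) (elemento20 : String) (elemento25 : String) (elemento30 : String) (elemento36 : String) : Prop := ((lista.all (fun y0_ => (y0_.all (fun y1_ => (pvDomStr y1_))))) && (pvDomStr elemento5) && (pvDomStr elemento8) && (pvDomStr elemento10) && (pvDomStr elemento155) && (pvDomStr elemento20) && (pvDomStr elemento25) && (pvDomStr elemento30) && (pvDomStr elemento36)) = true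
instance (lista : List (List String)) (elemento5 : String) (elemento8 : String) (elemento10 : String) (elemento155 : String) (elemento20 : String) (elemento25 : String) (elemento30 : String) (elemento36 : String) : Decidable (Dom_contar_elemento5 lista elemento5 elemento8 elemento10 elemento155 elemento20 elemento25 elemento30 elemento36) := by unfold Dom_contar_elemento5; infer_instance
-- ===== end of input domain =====

-- B flattens the nested lists once and returns a weighted sum of per-target counts instead of A's interleaved 8-way comparison loop (objective: simpler).
-- ===== PORT A =====
def contar_elemento5 (lista : List (List String)) (elemento5 : String) (elemento8 : String) (elemento10 : String) (elemento155 : String) (elemento20 : String) (elemento25 : String) (elemento30 : String) (elemento36 : String) : Int :=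
  lista.foldl (fun contador linha =>
    linha.foldl (fun contador item =>
      let contador := if item == elemento5 then contador + 1 else contador
      let contador := if item == elemento8 then contador + 1 else contador
      let contador := if item == elemento10 then contador + 2 else contador
      let contador := if item == elemento155 then contador + 3 else contador
      let contador := if item == elemento20 then contador + 4 else contador
      let contador := if item == elemento25 then contador + 5 else contador
      let contador := if item == elemento30 then contador + 6 else contador
      let contador := if item == elemento36 then contador + 7 else contador
      contador) contador) 0

-- ===== PORT B =====
def contar_elemento5_alt (lista : List (List String)) (elemento5 : String) (elemento8 : String) (elemento10 : String) (elemento155 : String) (elemento20 : String) (elemento25 : String) (elemento30 : String) (elemento36 : String) : Int :=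
  let flat := lista.flatMap (fun linha => linha.map (fun item => item))
  (PySem.List.count flat elemento5 : Int) * 1
    + (PySem.List.count flat elemento8 : Int) * 1
    + (PySem.List.count flat elemento10 : Int) * 2
    + (PySem.List.count flat elemento155 : Int) * 3
    + (PySem.List.count flat elemento20 : Int) * 4
    + (PySem.List.count flat elemento25 : Int) * 5
    + (PySem.List.count flat elemento30 : Int) * 6
    + (PySem.List.count flat elemento36 : Int) * 7

-- ===== PRECONDITION & SPEC =====
def Spec_contar_elemento5 (lista : List (List String)) (elemento5 : String) (elemento8 : String) (elemento10 : String) (elemento155 : String) (elemento20 : String) (elemento25 : String) (elemento30 : String) (elemento36 : String) (out : Int) : Prop := out = contar_elemento5_alt lista elemento5 elemento8 elemento10 elemento155 elemento20 elemento25 elemento30 elemento36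
instance (lista : List (List String)) (elemento5 : String) (elemento8 : String) (elemento10 : String) (elemento155 : String) (elemento20 : String) (elemento25 : String) (elemento30 : String) (elemento36 : String) (out : Int) : Decidable (Spec_contar_elemento5 lista elemento5 elemento8 elemento10 elemento155 elemento20 elemento25 elemento30 elemento36 out) := by unfold Spec_contar_elemento5; infer_instance

-- ===== CLAIM (what is proved, stated in full; the proofs are below) =====
def Claim_equal_contar_elemento5 : Prop := ∀ (lista : List (List String)) (elemento5 : String) (elemento8 : String) (elemento10 : String) (elemento155 : String) (elemento20 : String) (elemento25 : String) (elemento30 : String) (elemento36 : String), Dom_contar_elemento5 lista elemento5 elemento8 elemento10 elemento155 elemento20 elemento25 elemento30 elemento36 → Spec_contar_elemento5 lista elemento5 elemento8 elemento10 elemento155 elemento20 elemento25 elemento30 elemento36 (contar_elemento5 lista elemento5 elemento8 elemento10 elemento155 elemento20 elemento25 elemento30 elemento36)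

-- ===== LEMMAS AND PROOFS =====

-- total weight contributed by one item
def pvW (e5 e8 e10 e155 e20 e25 e30 e36 item : String) : Int :=
  (if item == e5 then 1 else 0) + (if item == e8 then 1 else 0)
    + (if item == e10 then 2 else 0) + (if item == e155 then 3 else 0)
    + (if item == e20 then 4 else 0) + (if item == e25 then 5 else 0)
    + (if item == e30 then 6 else 0) + (if item == e36 then 7 else 0)

theorem pv_ite (b : Bool) (x k : Int) :
    (if b = true then x + k else x) = x + (if b = true then k else 0) := by
  split_ifs <;> simp

theorem pv_inner (e5 e8 e10 e155 e20 e25 e30 e36 : String) (l : List String) (c : Int) :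
    l.foldl (fun contador item =>
      let contador := if item == e5 then contador + 1 else contador
      let contador := if item == e8 then contador + 1 else contador
      let contador := if item == e10 then contador + 2 else contador
      let contador := if item == e155 then contador + 3 else contador
      let contador := if item == e20 then contador + 4 else contador
      let contador := if item == e25 then contador + 5 else contador
      let contador := if item == e30 then contador + 6 else contador
      let contador := if item == e36 then contador + 7 else contador
      contador) c = c + (l.map (pvW e5 e8 e10 e155 e20 e25 e30 e36)).sum := by
  induction l generalizing c with
  | nil => simp
  | cons a l ih =>
    rw [List.foldl_cons, ih, List.map_cons, List.sum_cons]
    simp only [pv_ite, pvW]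
    ring

theorem pv_count_sum (e : String) (w : Int) (l : List String) :
    (PySem.List.count l e : Int) * w = (l.map (fun item => if item == e then w else 0)).sum := by
  induction l with
  | nil => simp [PySem.List.count]
  | cons a l ih =>
    simp only [PySem.List.count] at ih ⊢
    rw [List.map_cons, List.sum_cons, ← ih, List.count_cons]
    by_cases h : a == e <;> simp only [h, if_true] <;> push_cast <;> ring

theorem pv_outer (e5 e8 e10 e155 e20 e25 e30 e36 : String) (lista : List (List String)) (c : Int) :
    lista.foldl (fun contador linha =>
      linha.foldl (fun contador item =>
        let contador := if item == e5 then contador + 1 else contador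
        let contador := if item == e8 then contador + 1 else contador
        let contador := if item == e10 then contador + 2 else contador
        let contador := if item == e155 then contador + 3 else contador
        let contador := if item == e20 then contador + 4 else contador
        let contador := if item == e25 then contador + 5 else contador
        let contador := if item == e30 then contador + 6 else contador
        let contador := if item == e36 then contador + 7 else contador
        contador) contador) c
      = c + ((lista.flatMap (fun linha => linha.map (fun item => item))).map
          (pvW e5 e8 e10 e155 e20 e25 e30 e36)).sum := by
  induction lista generalizing c with
  | nil => simp
  | cons linha rest ih =>
    rw [List.foldl_cons, ih, pv_inner, List.flatMap_cons, List.map_append, List.sum_append,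
      List.map_id']
    ring

theorem pv_split (e5 e8 e10 e155 e20 e25 e30 e36 : String) (l : List String) :
    (l.map (pvW e5 e8 e10 e155 e20 e25 e30 e36)).sum
      = (l.map (fun item => if item == e5 then (1 : Int) else 0)).sum
        + (l.map (fun item => if item == e8 then (1 : Int) else 0)).sum
        + (l.map (fun item => if item == e10 then (2 : Int) else 0)).sum
        + (l.map (fun item => if item == e155 then (3 : Int) else 0)).sum
        + (l.map (fun item => if item == e20 then (4 : Int) else 0)).sum
        + (l.map (fun item => if item == e25 then (5 : Int) else 0)).sum
        + (l.map (fun item => if item == e30 then (6 : Int) else 0)).sum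
        + (l.map (fun item => if item == e36 then (7 : Int) else 0)).sum := by
  induction l with
  | nil => simp
  | cons a l ih =>
    simp only [List.map_cons, List.sum_cons, ih, pvW]
    ring

-- ===== VERDICT (by name: the statement is the Claim_ definition above) =====
theorem contar_elemento5_spec : Claim_equal_contar_elemento5 := by
  intro lista e5 e8 e10 e155 e20 e25 e30 e36 _
  unfold Spec_contar_elemento5 contar_elemento5 contar_elemento5_alt
  simp only []
  rw [pv_count_sum, pv_count_sum, pv_count_sum, pv_count_sum, pv_count_sum, pv_count_sum,
    pv_count_sum, pv_count_sum, pv_outer, pv_split]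
  ring
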